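-- pv_equiv track=rewrite | github.com/jak010/study-algorithm-src | Programmers/Level0/240501_조건에맞게수열반환하기2.py | solution
-- ===== SOURCE A (Python) =====
-- def solution(arr):
--     latest = arr
--     count = 0
--     for _ in range(len(arr)):
--         _temp = []
--         for idx, value in enumerate(latest):
--
--             if value >= 50 and value % 2 == 0:
--                 t = value / 2
--             elif value < 50 and value % 2 != 0:
--                 t = (value * 2) + 1
--             else:
--                 t = value
--
--             _temp.append(int(t))
--
--         if latest != _temp:
--             latest = _temp
--             count += 1
--         else:
--             break
--
--     return count
-- ===== SOURCE B (Python) =====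
-- def solution(arr):
--     # Per-element: each position evolves independently, so the number of changing
--     # rounds equals the max over elements of their steps-to-fixed-point, capped by
--     # len(arr) because A's outer loop runs at most len(arr) times.
--     n = len(arr)
--
--     def f(v):
--         if v >= 50 and v % 2 == 0:
--             return v // 2
--         if v < 50 and v % 2 != 0:
--             return v * 2 + 1
--         return v
--
--     best = 0
--     for v in arr:
--         s = 0
--         while s < n:
--             w = f(v)
--             if w == v:
--                 break
--             v = w
--             s += 1
--         best = max(best, s)
--     return best
-- ===== Notes on version B (the rewrite author's own statement) =====
-- stated objective: alternative
-- what changed: Instead of repeatedly rebuilding the whole array until a fixed point, B computes each element's steps-to-fixed-point independently (capped at len(arr), matching A's bounded outer loop) and returns the maximum.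
import Mathlib
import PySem

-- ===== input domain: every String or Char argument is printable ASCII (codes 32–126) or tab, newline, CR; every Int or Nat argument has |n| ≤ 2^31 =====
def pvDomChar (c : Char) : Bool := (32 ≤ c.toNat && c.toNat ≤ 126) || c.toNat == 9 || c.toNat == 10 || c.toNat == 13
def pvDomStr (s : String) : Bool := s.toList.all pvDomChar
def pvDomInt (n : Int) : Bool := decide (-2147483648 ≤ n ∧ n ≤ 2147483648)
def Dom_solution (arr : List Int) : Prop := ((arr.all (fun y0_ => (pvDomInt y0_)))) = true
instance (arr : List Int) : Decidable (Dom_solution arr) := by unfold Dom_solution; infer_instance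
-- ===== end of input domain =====

-- ===== PORT A =====
-- B replaces the whole-array fixed-point iteration by per-element step counts (capped
-- at len(arr), as A's outer loop is); equivalence of the RETURN value is proved.
-- pvF: the per-element transformation; int(value/2) is exact here since value is even
-- (and |value| stays well below 2^53), so it equals floor division by 2.
def pvF (v : Int) : Int :=
  if v ≥ 50 ∧ PySem.Int.mod v 2 = 0 then PySem.Int.floordiv v 2
  else if v < 50 ∧ PySem.Int.mod v 2 ≠ 0 then v * 2 + 1
  else v

-- inner 'for idx, value in enumerate(latest): _temp.append(int(t))' (idx unused)
def pvStepA (l : List Int) : List Int :=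
  l.foldl (fun acc v => acc ++ [pvF v]) []

-- outer 'for _ in range(len(arr))' with break, state (latest, count)
def pvLoopA : Nat → List Int → Int → Int
  | 0, _, c => c
  | n + 1, latest, c =>
      let t := pvStepA latest
      if latest ≠ t then pvLoopA n t (c + 1) else c

def solution (arr : List Int) : Int := pvLoopA arr.length arr 0

-- ===== PORT B =====
-- 'while s < n: w = f(v); if w == v: break; v = w; s += 1' — fuel-counted steps
def pvStepsB : Nat → Int → Nat
  | 0, _ => 0
  | n + 1, v => if pvF v ≠ v then pvStepsB n (pvF v) + 1 else 0

def solution_alt (arr : List Int) : Int :=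
  ((arr.foldl (fun best v => max best (pvStepsB arr.length v)) 0 : Nat) : Int)

-- ===== PRECONDITION & SPEC =====
def Spec_solution (arr : List Int) (out : Int) : Prop := out = solution_alt arr
instance (arr : List Int) (out : Int) : Decidable (Spec_solution arr out) := by unfold Spec_solution; infer_instance

-- ===== CLAIM (what is proved, stated in full; the proofs are below) =====
def Claim_equal_solution : Prop := ∀ (arr : List Int), Dom_solution arr → Spec_solution arr (solution arr)

-- ===== LEMMAS AND PROOFS =====

def pvS (n : Nat) (l : List Int) : Nat := (l.map (pvStepsB n)).foldr max 0

theorem pvStepA_aux (l : List Int) (acc : List Int) :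
    l.foldl (fun a v => a ++ [pvF v]) acc = acc ++ l.map pvF := by
  induction l generalizing acc with
  | nil => simp
  | cons v t ih => simp [List.foldl, ih]

theorem pvStepA_eq (l : List Int) : pvStepA l = l.map pvF := by
  rw [pvStepA, pvStepA_aux l []]; rfl

theorem pvStepsB_fix {v : Int} (h : pvF v = v) (n : Nat) : pvStepsB n v = 0 := by
  cases n <;> simp [pvStepsB, h]

theorem pvS_zero_of_fixed {l : List Int} (h : ∀ v ∈ l, pvF v = v) (n : Nat) :
    pvS n l = 0 := by
  induction l with
  | nil => rfl
  | cons v t ih =>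
      have h1 := pvStepsB_fix (h v (by simp)) n
      have h2 := ih (fun w hw => h w (by simp [hw]))
      simp [pvS, List.map] at *
      omega

theorem pvFixed_of_eq {l : List Int} (h : l.map pvF = l) : ∀ v ∈ l, pvF v = v := by
  induction l with
  | nil => simp
  | cons v t ih =>
      simp [List.map] at h
      intro w hw
      rcases List.mem_cons.mp hw with rfl | hw
      · exact h.1
      · exact ih h.2 w hw

theorem pvEq_of_fixed {l : List Int} (h : ∀ v ∈ l, pvF v = v) : l.map pvF = l := by
  calc l.map pvF = l.map id := List.map_congr_left h
  _ = l := List.map_id l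

theorem pvS_succ {l : List Int} (h : ∃ v ∈ l, pvF v ≠ v) (n : Nat) :
    pvS (n + 1) l = pvS n (l.map pvF) + 1 := by
  induction l with
  | nil => simp at h
  | cons v t ih =>
      by_cases hv : pvF v = v
      · -- head fixed, so the witness is in the tail
        have ht : ∃ w ∈ t, pvF w ≠ w := by
          rcases h with ⟨w, hw, hne⟩
          rcases List.mem_cons.mp hw with rfl | hw
          · exact absurd hv hne
          · exact ⟨w, hw, hne⟩
        have := ih ht
        have h0 : pvStepsB (n + 1) v = 0 := pvStepsB_fix hv (n + 1)
        have h0' : pvStepsB n (pvF v) = 0 := pvStepsB_fix (by rw [hv]; exact hv) n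
        simp [pvS, List.map] at *
        omega
      · -- head changes
        have hgv : pvStepsB (n + 1) v = pvStepsB n (pvF v) + 1 := by
          simp [pvStepsB, hv]
        by_cases ht : ∃ w ∈ t, pvF w ≠ w
        · have := ih ht
          simp [pvS, List.map] at *
          omega
        · have htfix : ∀ w ∈ t, pvF w = w := by
            intro w hw; by_contra hne; exact ht ⟨w, hw, hne⟩
          have h1 : pvS (n + 1) t = 0 := pvS_zero_of_fixed htfix (n + 1)
          have h2 : pvS n (t.map pvF) = 0 := by
            apply pvS_zero_of_fixed _ n
            intro w hw
            rcases List.mem_map.mp hw with ⟨u, hu, rfl⟩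
            rw [htfix u hu]; exact htfix u hu
          simp [pvS, List.map] at *
          omega

theorem pvLoopA_eq (n : Nat) : ∀ (l : List Int) (c : Int),
    pvLoopA n l c = c + (pvS n l : Int) := by
  induction n with
  | zero =>
      intro l c
      have h0 : pvS 0 l = 0 := by
        induction l with
        | nil => rfl
        | cons v t ih => simp [pvS, pvStepsB] at *; omega
      simp [pvLoopA, h0]
  | succ n ih =>
      intro l c
      rw [pvLoopA]
      simp only [pvStepA_eq]
      by_cases h : l = l.map pvF
      · have hfix : ∀ v ∈ l, pvF v = v := pvFixed_of_eq h.symm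
        rw [if_neg (by simp [← h]), pvS_zero_of_fixed hfix]
        simp
      · have hne : ∃ v ∈ l, pvF v ≠ v := by
          by_contra hc
          push Not at hc
          exact h (pvEq_of_fixed hc).symm
        rw [if_pos (by exact h), ih, pvS_succ hne]
        push_cast
        ring

theorem pvFoldlMax (n : Nat) : ∀ (l : List Int) (a : Nat),
    l.foldl (fun b v => max b (pvStepsB n v)) a = max a (pvS n l) := by
  intro l
  induction l with
  | nil => intro a; simp [pvS]
  | cons v t ih =>
      intro a
      simp only [List.foldl, ih, pvS, List.map, List.foldr]
      omega

-- ===== VERDICT (by name: the statement is the Claim_ definition above) =====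
theorem solution_spec : Claim_equal_solution := by
  intro arr _
  unfold Spec_solution solution solution_alt
  rw [pvLoopA_eq, pvFoldlMax]
  simp
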